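-- pv_equiv track=rewrite | github.com/naren-source/problem-solving-python3 | problem_solving/module_5/2_sum_right_side.py | sum_of_right_elements
-- ===== SOURCE A (Python) =====
-- def sum_of_right_elements(list_items: list) -> list:
--     for idx_i, _ in enumerate(list_items):
--         right_sum = 0
--         for idx_j, j in enumerate(list_items):
--             if idx_j > idx_i:
--                 right_sum += j
--         list_items[idx_i] = right_sum
--     return list_items
-- ===== SOURCE B (Python) =====
-- def sum_of_right_elements(list_items: list) -> list:
--     # Single right-to-left pass with a running suffix sum (returns a new list;
--     # unlike A, it does not mutate its argument -- equivalence is about the return value).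
--     running = 0
--     out = []
--     for x in reversed(list_items):
--         out.append(running)
--         running += x
--     out.reverse()
--     return out
-- ===== Notes on version B (the rewrite author's own statement) =====
-- stated objective: faster
-- what changed: Replaced the nested enumerate scan (recomputing each right-side sum from scratch) by one right-to-left pass maintaining a running suffix sum.
import Mathlib
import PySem

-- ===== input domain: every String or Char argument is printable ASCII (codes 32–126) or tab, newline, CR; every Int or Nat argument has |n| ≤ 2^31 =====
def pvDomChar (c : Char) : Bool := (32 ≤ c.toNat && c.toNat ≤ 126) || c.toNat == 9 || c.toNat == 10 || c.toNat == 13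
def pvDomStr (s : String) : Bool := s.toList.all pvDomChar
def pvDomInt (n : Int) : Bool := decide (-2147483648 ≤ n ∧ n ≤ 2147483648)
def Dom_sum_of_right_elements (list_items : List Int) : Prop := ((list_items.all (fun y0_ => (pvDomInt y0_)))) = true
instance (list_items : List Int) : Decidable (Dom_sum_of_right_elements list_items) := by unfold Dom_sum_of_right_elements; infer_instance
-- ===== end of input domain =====

-- B replaces A's nested quadratic scan by one right-to-left pass with a running suffix
-- sum (objective: faster). A mutates its argument in place, B returns a fresh list; the
-- equivalence proved here is about the return value only.

-- ===== PORT A =====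
-- Literal port of A: for each (idx_i, _) of enumerate(list_items), recompute right_sum
-- by scanning enumerate of the current list, then assign at idx_i (always in range, so
-- List.set at idx_i.toNat is exact).
def sum_of_right_elements (list_items : List Int) : List Int :=
  (PySem.List.enumerate list_items 0).foldl
    (fun cur p =>
      let right_sum : Int :=
        (PySem.List.enumerate cur 0).foldl
          (fun s q => if q.1 > p.1 then s + q.2 else s) 0
      cur.set p.1.toNat right_sum)
    list_items

-- ===== PORT B =====
-- Port of Source B: fold over the reversed list carrying (running, out), appending the
-- running suffix sum before adding the element, then reverse the output.
def sum_of_right_elements_alt (list_items : List Int) : List Int :=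
  let p := list_items.reverse.foldl
    (fun (acc : Int × List Int) x => (acc.1 + x, acc.2 ++ [acc.1])) (0, [])
  p.2.reverse

-- ===== PRECONDITION & SPEC =====
def Spec_sum_of_right_elements (list_items : List Int) (out : List Int) : Prop := out = sum_of_right_elements_alt list_items
instance (list_items : List Int) (out : List Int) : Decidable (Spec_sum_of_right_elements list_items out) := by unfold Spec_sum_of_right_elements; infer_instance

-- ===== CLAIM (what is proved, stated in full; the proofs are below) =====
def Claim_equal_sum_of_right_elements : Prop := ∀ (list_items : List Int), Dom_sum_of_right_elements list_items → Spec_sum_of_right_elements list_items (sum_of_right_elements list_items)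

-- ===== LEMMAS AND PROOFS =====

-- suffix sums: sfx xs ! i = sum of the elements strictly to the right of i
def sfx : List Int → List Int
  | [] => []
  | _ :: t => t.sum :: sfx t

@[simp] theorem sfx_length (xs : List Int) : (sfx xs).length = xs.length := by
  induction xs with
  | nil => rfl
  | cons x t ih => simp [sfx, ih]

theorem sfx_getElem (xs : List Int) (k : Nat) (hk : k < xs.length) :
    (sfx xs)[k]'(by simpa using hk) = (xs.drop (k + 1)).sum := by
  induction xs generalizing k with
  | nil => simp at hk
  | cons x t ih =>
    cases k with
    | zero => simp [sfx]
    | succ m => simpa [sfx] using ih m (by simpa using hk)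

-- ---------- B side ----------
def gAux (s : Int) : List Int → List Int
  | [] => []
  | x :: t => s :: gAux (s + x) t

theorem foldl_gAux (ys : List Int) : ∀ (s : Int) (out : List Int),
    ys.foldl (fun (acc : Int × List Int) x => (acc.1 + x, acc.2 ++ [acc.1])) (s, out)
      = (s + ys.sum, out ++ gAux s ys) := by
  induction ys with
  | nil => simp [gAux]
  | cons y t ih =>
    intro s out
    simp only [List.foldl_cons, ih, gAux]
    refine Prod.ext ?_ ?_
    · simp [List.sum_cons]; ring
    · simp

theorem gAux_append (u v : List Int) : ∀ (s : Int),
    gAux s (u ++ v) = gAux s u ++ gAux (s + u.sum) v := by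
  induction u with
  | nil => simp [gAux]
  | cons x t ih => intro s; simp [gAux, ih, add_assoc]

theorem gAux_reverse (xs : List Int) : ∀ (s : Int),
    (gAux s xs.reverse).reverse = (sfx xs).map (· + s) := by
  induction xs with
  | nil => intro s; simp [gAux, sfx]
  | cons x t ih =>
    intro s
    simp only [List.reverse_cons, gAux_append, gAux, sfx, List.map_cons]
    simp [ih, add_comm]

theorem alt_eq_sfx (xs : List Int) : sum_of_right_elements_alt xs = sfx xs := by
  simp only [sum_of_right_elements_alt, foldl_gAux, List.nil_append, gAux_reverse]
  simp

-- ---------- A side ----------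
-- the inner loop: summing elements whose index exceeds i
theorem inner_ge (cur : List Int) : ∀ (a acc i : Int), i < a →
    (PySem.List.enumerate cur a).foldl
      (fun s q => if q.1 > i then s + q.2 else s) acc = acc + cur.sum := by
  induction cur with
  | nil => intro a acc i _; simp [PySem.List.enumerate_nil]
  | cons x t ih =>
    intro a acc i h
    rw [PySem.List.enumerate_cons]
    simp only [List.foldl_cons, if_pos (show a > i from h)]
    rw [ih (a + 1) (acc + x) i (by omega)]
    simp; ring

theorem inner_main (cur : List Int) : ∀ (a acc i : Int), a ≤ i →
    (PySem.List.enumerate cur a).foldl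
      (fun s q => if q.1 > i then s + q.2 else s) acc
      = acc + (cur.drop ((i - a).toNat + 1)).sum := by
  induction cur with
  | nil => intro a acc i _; simp [PySem.List.enumerate_nil]
  | cons x t ih =>
    intro a acc i h
    rw [PySem.List.enumerate_cons]
    simp only [List.foldl_cons, if_neg (show ¬ a > i by omega)]
    by_cases h1 : a + 1 ≤ i
    · rw [ih (a + 1) acc i h1]
      have : (i - a).toNat = (i - (a + 1)).toNat + 1 := by omega
      simp [this]
    · have hia : i = a := by omega
      rw [inner_ge t (a + 1) acc i (by omega)]
      simp [hia]

-- the outer loop invariant: after processing indices < k the list is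
-- (sfx xs).take k ++ xs.drop k
theorem outer_inv (ys : List Int) : ∀ (k : Nat) (xs : List Int),
    k + ys.length = xs.length →
    (PySem.List.enumerate ys (k : Int)).foldl
      (fun cur p =>
        let right_sum : Int :=
          (PySem.List.enumerate cur 0).foldl
            (fun s q => if q.1 > p.1 then s + q.2 else s) 0
        cur.set p.1.toNat right_sum)
      ((sfx xs).take k ++ xs.drop k) = sfx xs := by
  induction ys with
  | nil =>
    intro k xs hk
    simp at hk
    rw [PySem.List.enumerate_nil]
    simp [hk, List.take_of_length_le (le_of_eq (sfx_length xs)), List.drop_of_length_le]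
  | cons y t ih =>
    intro k xs hk
    have hklt : k < xs.length := by simp at hk; omega
    rw [PySem.List.enumerate_cons, List.foldl_cons]
    have hcur : ((sfx xs).take k ++ xs.drop k) = (sfx xs).take k ++ xs[k] :: xs.drop (k + 1) := by
      rw [List.drop_eq_getElem_cons hklt]
    have hlenk : ((sfx xs).take k).length = k := by
      simp; omega
    -- the inner sum
    have hinner :
        (PySem.List.enumerate ((sfx xs).take k ++ xs.drop k) 0).foldl
          (fun s q => if q.1 > ((k : Int), y).1 then s + q.2 else s) 0
          = (xs.drop (k + 1)).sum := by
      rw [inner_main _ 0 0 (k : Int) (by omega)]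
      have h2 : ((k : Int) - 0).toNat = k := by omega
      rw [h2, hcur]
      rw [show k + 1 = ((sfx xs).take k).length + 1 from by omega, List.drop_append]
      simp
      rw [List.drop_eq_nil_of_le (by simp)]
      simp
    -- the set
    have hset : ((sfx xs).take k ++ xs.drop k).set ((k : Int)).toNat ((xs.drop (k + 1)).sum)
        = (sfx xs).take (k + 1) ++ xs.drop (k + 1) := by
      rw [hcur]
      have hkn : ((k : Int)).toNat = k := by omega
      rw [hkn, List.set_append_right _ _ (by omega)]
      have : k - ((sfx xs).take k).length = 0 := by omega
      rw [this, List.set_cons_zero]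
      have htake : (sfx xs).take (k + 1) = (sfx xs).take k ++ [(sfx xs)[k]'(by simpa using hklt)] := by
        rw [List.take_add_one, List.getElem?_eq_getElem (by simpa using hklt)]
        rfl
      rw [htake, sfx_getElem xs k hklt]
      simp
    simp only [hinner, hset]
    exact ih (k + 1) xs (by simp at hk ⊢; omega)

theorem a_eq_sfx (xs : List Int) : sum_of_right_elements xs = sfx xs := by
  have h := outer_inv xs 0 xs (by simp)
  simpa [sum_of_right_elements] using h

-- ===== VERDICT (by name: the statement is the Claim_ definition above) =====
theorem sum_of_right_elements_spec : Claim_equal_sum_of_right_elements := by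
  intro xs _
  unfold Spec_sum_of_right_elements
  rw [a_eq_sfx, alt_eq_sfx]
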